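-- pv_equiv track=rewrite | github.com/AbLECPS/alc | webgme/ALC-Dev/src/plugins/LaunchActivity/LaunchActivity/SlurmSetup.py | append_number_to_name
-- ===== SOURCE A (Python) =====
-- def append_number_to_name(name, data_node_name_set):
--
--     new_name = None
--
--     check_number = True
--     new_number = -1
--     while check_number:
--         check_number = False
--         new_number += 1
--         new_name = "{0}-{1}".format(name, new_number)
--         for data_node_name in data_node_name_set:
--             if data_node_name.startswith(new_name):
--                 remainder = data_node_name[len(name):]
--                 if remainder == "" or remainder.startswith('-'):
--                     check_number = True
--                     break
--
--     return new_name
-- ===== SOURCE B (Python) =====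
-- def append_number_to_name(name, data_node_name_set):
--     # One pass: collect every digit-run prefix after "name-" as a blocked string,
--     # then take the smallest k whose decimal form is not blocked.
--     prefix = name + "-"
--     blocked = set()
--     for s in data_node_name_set:
--         if s.startswith(prefix):
--             u = ""
--             for ch in s[len(prefix):]:
--                 if not ch.isdigit():
--                     break
--                 u += ch
--                 blocked.add(u)
--     k = 0
--     while str(k) in blocked:
--         k += 1
--     return prefix + str(k)
-- ===== Notes on version B (the rewrite author's own statement) =====
-- stated objective: alternative
-- what changed: A rescans the whole name list for every candidate number k; B makes a single pass that collects every blocked digit-run prefix after 'name-' into a set, then counts k upward with set lookups only.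
import Mathlib
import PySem

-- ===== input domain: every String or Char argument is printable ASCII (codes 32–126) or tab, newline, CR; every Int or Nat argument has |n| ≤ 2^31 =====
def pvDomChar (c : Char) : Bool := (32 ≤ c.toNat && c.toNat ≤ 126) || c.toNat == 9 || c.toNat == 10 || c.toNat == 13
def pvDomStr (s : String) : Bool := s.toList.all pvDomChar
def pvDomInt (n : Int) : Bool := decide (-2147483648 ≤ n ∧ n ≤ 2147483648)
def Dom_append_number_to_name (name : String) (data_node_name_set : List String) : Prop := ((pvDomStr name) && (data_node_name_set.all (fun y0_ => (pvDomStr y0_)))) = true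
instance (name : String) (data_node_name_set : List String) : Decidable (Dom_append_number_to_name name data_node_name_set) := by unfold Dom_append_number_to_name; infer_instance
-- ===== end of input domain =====

-- B replaces A's retry loop (rescan the whole list for every candidate k) by one pass that
-- collects every blocked digit-prefix string after "name-", then takes the first free k.

-- ===== PORT A =====
-- the for-loop body of A: any name starting with new_name whose remainder is "" or starts with '-'
def pvCheckA (nameL : List Char) (nn : List Char) (dn : List (List Char)) : Bool :=
  dn.any (fun s =>
    PySem.Chars.startswith s nn &&
      (let remainder := PySem.Chars.slice s (some (PySem.Chars.len nameL)) none
       (remainder == []) || PySem.Chars.startswith remainder ['-']))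

-- A's while-loop; `n` is A's new_number before the `+= 1` at the top of the body.
-- The fuel argument is a totality guard only: with fuel = pvFuel it is never exhausted.
def pvLoopA (nameL : List Char) (dn : List (List Char)) : Nat → Int → List Char
  | 0, n => nameL ++ '-' :: PySem.Int.toChars (n + 1)
  | fuel + 1, n =>
    let k := n + 1
    let nn := nameL ++ '-' :: PySem.Int.toChars k
    if pvCheckA nameL nn dn then pvLoopA nameL dn fuel k else nn

-- totality guard: a blocked k has its decimal form inside some element, so k < 10 ^ (total length)
def pvFuel (dn : List (List Char)) : Nat := 10 ^ (dn.map List.length).sum + 1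

def append_number_to_name (name : String) (data_node_name_set : List String) : String :=
  String.ofList (pvLoopA name.toList (data_node_name_set.map String.toList)
    (pvFuel (data_node_name_set.map String.toList)) (-1))

-- ===== PORT B =====
-- B's inner for-loop: grow u along the digit run of t, adding each prefix to the set
def pvInnerB (u : List Char) (acc : PySem.Set (List Char)) : List Char → PySem.Set (List Char)
  | [] => acc
  | c :: rest =>
    if PySem.Chars.isdigit c then pvInnerB (u ++ [c]) (PySem.Set.add acc (u ++ [c])) rest
    else acc

-- B's outer for-loop building the blocked set
def pvBlockedB (pre : List Char) (dn : List (List Char)) : PySem.Set (List Char) :=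
  dn.foldl
    (fun acc s =>
      if PySem.Chars.startswith s pre then
        pvInnerB [] acc (PySem.Chars.slice s (some (PySem.Chars.len pre)) none)
      else acc)
    (PySem.Set.ofList [])

-- B's `while str(k) in blocked: k += 1` (fuel is a totality guard only, as in port A)
def pvLoopB (pre : List Char) (blocked : PySem.Set (List Char)) : Nat → Int → List Char
  | 0, k => pre ++ PySem.Int.toChars k
  | fuel + 1, k =>
    if PySem.Int.toChars k ∈ blocked then pvLoopB pre blocked fuel (k + 1)
    else pre ++ PySem.Int.toChars k

def append_number_to_name_alt (name : String) (data_node_name_set : List String) : String :=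
  String.ofList (pvLoopB (name.toList ++ ['-'])
    (pvBlockedB (name.toList ++ ['-']) (data_node_name_set.map String.toList))
    (pvFuel (data_node_name_set.map String.toList)) 0)

-- ===== PRECONDITION & SPEC =====
def Spec_append_number_to_name (name : String) (data_node_name_set : List String) (out : String) : Prop := out = append_number_to_name_alt name data_node_name_set
instance (name : String) (data_node_name_set : List String) (out : String) : Decidable (Spec_append_number_to_name name data_node_name_set out) := by unfold Spec_append_number_to_name; infer_instance

-- ===== CLAIM (what is proved, stated in full; the proofs are below) =====
def Claim_equal_append_number_to_name : Prop := ∀ (name : String) (data_node_name_set : List String), Dom_append_number_to_name name data_node_name_set → Spec_append_number_to_name name data_node_name_set (append_number_to_name name data_node_name_set)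

-- ===== LEMMAS AND PROOFS =====

theorem pv_toChars_natCast (k : Nat) : PySem.Int.toChars (k : Int) = Nat.toDigits 10 k := by
  simp [PySem.Int.toChars]

theorem pv_toDigits_ne_nil (k : Nat) : Nat.toDigits 10 k ≠ [] := by
  have h := @Nat.length_toDigits_pos 10 k
  intro hnil
  simp [hnil] at h

theorem pv_toDigits_digits (k : Nat) : ∀ c ∈ Nat.toDigits 10 k, PySem.Chars.isdigit c = true := by
  intro c hc
  have h := Nat.isDigit_of_mem_toDigits (by norm_num) (by norm_num) hc
  simp only [Char.isDigit, Bool.and_eq_true, decide_eq_true_eq] at h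
  simp only [PySem.Chars.isdigit, Bool.and_eq_true, decide_eq_true_eq]
  exact h

theorem pv_prefix_append_split (a b s : List Char) :
    (a ++ b <+: s) ↔ a <+: s ∧ b <+: s.drop a.length := by
  constructor
  · rintro ⟨t, rfl⟩
    exact ⟨⟨b ++ t, by simp⟩, by simp⟩
  · rintro ⟨⟨t, rfl⟩, hb⟩
    simp only [List.drop_left] at hb
    exact ⟨hb.choose, by rw [List.append_assoc, hb.choose_spec]⟩

theorem pv_checkA_iff (nameL u : List Char) (dn : List (List Char)) :
    pvCheckA nameL (nameL ++ '-' :: u) dn = true ↔ ∃ s ∈ dn, nameL ++ '-' :: u <+: s := by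
  unfold pvCheckA
  rw [List.any_eq_true]
  constructor
  · rintro ⟨s, hs, hb⟩
    refine ⟨s, hs, ?_⟩
    rcases Bool.and_eq_true_iff.mp hb with ⟨h1, _⟩
    exact (PySem.Chars.startswith_iff s _).mp h1
  · rintro ⟨s, hs, hp⟩
    refine ⟨s, hs, ?_⟩
    rw [Bool.and_eq_true_iff]
    refine ⟨(PySem.Chars.startswith_iff s _).mpr hp, ?_⟩
    have hrem : PySem.Chars.slice s (some (PySem.Chars.len nameL)) none = s.drop nameL.length := by
      simp only [PySem.Chars.slice_eq_listSlice, PySem.Chars.len_eq]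
      rw [PySem.List.slice_from s (Int.natCast_nonneg _)]
      simp
    rw [hrem]
    have : ('-' :: u) <+: s.drop nameL.length := by
      have := (pv_prefix_append_split nameL ('-' :: u) s).mp hp
      exact this.2
    have h2 : ['-'] <+: s.drop nameL.length :=
      List.IsPrefix.trans ⟨u, rfl⟩ this
    rw [Bool.or_eq_true]
    right
    exact (PySem.Chars.startswith_iff _ _).mpr h2

theorem pv_innerB_mem (t : List Char) : ∀ (u : List Char) (acc : PySem.Set (List Char)) (w : List Char),
    w ∈ pvInnerB u acc t ↔
      w ∈ acc ∨ ∃ v, v ≠ [] ∧ (∀ c ∈ v, PySem.Chars.isdigit c = true) ∧ v <+: t ∧ w = u ++ v := by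
  induction t with
  | nil =>
    intro u acc w
    simp only [pvInnerB]
    constructor
    · exact Or.inl
    · rintro (h | ⟨v, hv, _, hp, _⟩)
      · exact h
      · exact absurd (List.prefix_nil.mp hp) hv
  | cons c rest ih =>
    intro u acc w
    by_cases hd : PySem.Chars.isdigit c = true
    · simp only [pvInnerB, hd, if_pos]
      rw [ih]
      rw [PySem.Set.mem_add]
      constructor
      · rintro ((h | h) | ⟨v, hv, hdig, hp, rfl⟩)
        · exact Or.inl h
        · exact Or.inr ⟨[c], by simp, by simpa using hd, ⟨rest, rfl⟩, by simpa using h⟩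
        · refine Or.inr ⟨c :: v, by simp, ?_, ?_, by simp⟩
          · intro x hx
            rcases List.mem_cons.mp hx with rfl | hx
            · exact hd
            · exact hdig x hx
          · exact (List.cons_prefix_cons).mpr ⟨rfl, hp⟩
      · rintro (h | ⟨v, hv, hdig, hp, rfl⟩)
        · exact Or.inl (Or.inl h)
        · rcases v with _ | ⟨c', v'⟩
          · exact absurd rfl hv
          · rcases List.cons_prefix_cons.mp hp with ⟨rfl, hp'⟩
            rcases v' with _ | ⟨c2, v2⟩
            · exact Or.inl (Or.inr rfl)
            · refine Or.inr ⟨c2 :: v2, by simp, ?_, hp', by simp⟩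
              intro x hx
              exact hdig x (List.mem_cons_of_mem _ hx)
    · simp only [pvInnerB, hd, if_neg, Bool.false_eq_true, not_false_iff]
      constructor
      · exact Or.inl
      · rintro (h | ⟨v, hv, hdig, hp, rfl⟩)
        · exact h
        · rcases v with _ | ⟨c', v'⟩
          · exact absurd rfl hv
          · rcases List.cons_prefix_cons.mp hp with ⟨rfl, _⟩
            exact absurd (hdig c' (List.mem_cons_self)) hd

theorem pv_blockedB_mem (pre : List Char) (dn : List (List Char)) (w : List Char) :
    w ∈ pvBlockedB pre dn ↔
      ∃ s ∈ dn, pre <+: s ∧ w ≠ [] ∧ (∀ c ∈ w, PySem.Chars.isdigit c = true) ∧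
        w <+: s.drop pre.length := by
  unfold pvBlockedB
  suffices H : ∀ (l : List (List Char)) (acc : PySem.Set (List Char)),
      w ∈ l.foldl (fun acc s =>
        if PySem.Chars.startswith s pre then
          pvInnerB [] acc (PySem.Chars.slice s (some (PySem.Chars.len pre)) none)
        else acc) acc ↔
      w ∈ acc ∨ ∃ s ∈ l, pre <+: s ∧ w ≠ [] ∧ (∀ c ∈ w, PySem.Chars.isdigit c = true) ∧
        w <+: s.drop pre.length by
    rw [H]
    simp
  intro l
  induction l with
  | nil => intro acc; simp
  | cons s l ih =>
    intro acc
    rw [List.foldl_cons, ih]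
    have hslice : PySem.Chars.slice s (some (PySem.Chars.len pre)) none = s.drop pre.length := by
      simp only [PySem.Chars.slice_eq_listSlice, PySem.Chars.len_eq]
      rw [PySem.List.slice_from s (Int.natCast_nonneg _)]
      simp
    by_cases hsw : PySem.Chars.startswith s pre = true
    · rw [if_pos hsw, hslice, pv_innerB_mem]
      have hpre : pre <+: s := (PySem.Chars.startswith_iff s pre).mp hsw
      constructor
      · rintro ((h | ⟨v, hv, hdig, hp, hw⟩) | ⟨s', hs', rest⟩)
        · exact Or.inl h
        · have hwv : w = v := by simpa using hw
          subst hwv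
          exact Or.inr ⟨s, List.mem_cons_self, hpre, hv, hdig, hp⟩
        · exact Or.inr ⟨s', List.mem_cons_of_mem _ hs', rest⟩
      · rintro (h | ⟨s', hs', hpre', hne, hdig, hp⟩)
        · exact Or.inl (Or.inl h)
        · rcases List.mem_cons.mp hs' with rfl | hs'
          · exact Or.inl (Or.inr ⟨w, hne, hdig, hp, by simp⟩)
          · exact Or.inr ⟨s', hs', hpre', hne, hdig, hp⟩
    · rw [if_neg hsw]
      constructor
      · rintro (h | ⟨s', hs', rest⟩)
        · exact Or.inl h
        · exact Or.inr ⟨s', List.mem_cons_of_mem _ hs', rest⟩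
      · rintro (h | ⟨s', hs', hpre', rest⟩)
        · exact Or.inl h
        · rcases List.mem_cons.mp hs' with rfl | hs'
          · exact absurd ((PySem.Chars.startswith_iff s' pre).mpr hpre') hsw
          · exact Or.inr ⟨s', hs', hpre', rest⟩

-- A's loop test at candidate k equals B's membership test at k
theorem pv_check_eq_mem (nameL : List Char) (dn : List (List Char)) (k : Nat) :
    (pvCheckA nameL (nameL ++ '-' :: PySem.Int.toChars (k : Int)) dn = true) ↔
      PySem.Int.toChars (k : Int) ∈ pvBlockedB (nameL ++ ['-']) dn := by
  rw [pv_checkA_iff, pv_blockedB_mem, pv_toChars_natCast]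
  constructor
  · rintro ⟨s, hs, hp⟩
    have hp' : (nameL ++ ['-']) ++ Nat.toDigits 10 k <+: s := by simpa using hp
    rcases (pv_prefix_append_split _ _ s).mp hp' with ⟨h1, h2⟩
    exact ⟨s, hs, h1, pv_toDigits_ne_nil k, pv_toDigits_digits k, h2⟩
  · rintro ⟨s, hs, h1, _, _, h2⟩
    refine ⟨s, hs, ?_⟩
    have : (nameL ++ ['-']) ++ Nat.toDigits 10 k <+: s :=
      (pv_prefix_append_split _ _ s).mpr ⟨h1, h2⟩
    simpa using this

theorem pv_loop_eq (nameL : List Char) (dn : List (List Char)) :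
    ∀ (fuel : Nat) (k : Nat),
      pvLoopA nameL dn fuel ((k : Int) - 1) =
        pvLoopB (nameL ++ ['-']) (pvBlockedB (nameL ++ ['-']) dn) fuel (k : Int) := by
  intro fuel
  induction fuel with
  | zero =>
    intro k
    simp [pvLoopA, pvLoopB]
  | succ fuel ih =>
    intro k
    simp only [pvLoopA, pvLoopB, sub_add_cancel]
    by_cases hm : PySem.Int.toChars (k : Int) ∈ pvBlockedB (nameL ++ ['-']) dn
    · rw [if_pos ((pv_check_eq_mem nameL dn k).mpr hm), if_pos hm]
      have := ih (k + 1)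
      push_cast at this
      simpa using this
    · rw [if_neg (fun h => hm ((pv_check_eq_mem nameL dn k).mp h)), if_neg hm]
      simp

-- ===== VERDICT (by name: the statement is the Claim_ definition above) =====
theorem append_number_to_name_spec : Claim_equal_append_number_to_name := by
  intro name dn _
  unfold Spec_append_number_to_name append_number_to_name append_number_to_name_alt
  have h := pv_loop_eq name.toList (dn.map String.toList) (pvFuel (dn.map String.toList)) 0
  norm_num at h
  rw [h]
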